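-- pv_equiv track=rewrite | github.com/dsardelic/AdventOfCode2020 | aoc2020/day_21_part_1.py | determine_dangerous_ingredients
-- ===== SOURCE A (Python) =====
-- def determine_dangerous_ingredients(dangerous_mixtures_of_ingredients):
--     newly_determined_dangerous_ingredients = {
--         mixture.pop()
--         for mixture in dangerous_mixtures_of_ingredients
--         if len(mixture) == 1
--     }
--     if newly_determined_dangerous_ingredients:
--         for mixture in dangerous_mixtures_of_ingredients:
--             mixture -= newly_determined_dangerous_ingredients
--         return newly_determined_dangerous_ingredients.union(
--             determine_dangerous_ingredients(dangerous_mixtures_of_ingredients)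
--         )
--     return set()
-- ===== SOURCE B (Python) =====
-- def determine_dangerous_ingredients(dangerous_mixtures_of_ingredients):
--     # Worklist over an ingredient -> mixture-indices inverted index: a resolved
--     # ingredient is removed only from the mixtures that actually contain it,
--     # instead of re-subtracting the resolved set from every mixture each round.
--     mixtures = list(dangerous_mixtures_of_ingredients)
--     remaining = [set(m) for m in mixtures]
--     index = {}
--     for j in range(len(mixtures)):
--         for ingredient in mixtures[j]:
--             postings = index.setdefault(ingredient, [])
--             if not postings or postings[-1] != j:
--                 postings.append(j)
--     resolved = []
--     frontier = [j for j in range(len(remaining)) if len(remaining[j]) == 1]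
--     while frontier:
--         newly = []
--         for j in frontier:
--             (ingredient,) = remaining[j]
--             if ingredient not in newly:
--                 newly.append(ingredient)
--         for ingredient in newly:
--             for j in index[ingredient]:
--                 remaining[j].discard(ingredient)
--         resolved.extend(newly)
--         frontier = [j for j in range(len(remaining)) if len(remaining[j]) == 1]
--     return set(resolved)
-- ===== Notes on version B (the rewrite author's own statement) =====
-- stated objective: alternative
-- what changed: A recursively rescans and re-subtracts the newly-resolved set from EVERY mixture each round (set difference over all mixtures per round); B builds an ingredient-to-mixture-indices inverted index once and, per round, removes each newly-resolved ingredient only from the mixtures that actually contain it (worklist over index postings), accumulating the resolved list iteratively.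
import Mathlib
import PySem

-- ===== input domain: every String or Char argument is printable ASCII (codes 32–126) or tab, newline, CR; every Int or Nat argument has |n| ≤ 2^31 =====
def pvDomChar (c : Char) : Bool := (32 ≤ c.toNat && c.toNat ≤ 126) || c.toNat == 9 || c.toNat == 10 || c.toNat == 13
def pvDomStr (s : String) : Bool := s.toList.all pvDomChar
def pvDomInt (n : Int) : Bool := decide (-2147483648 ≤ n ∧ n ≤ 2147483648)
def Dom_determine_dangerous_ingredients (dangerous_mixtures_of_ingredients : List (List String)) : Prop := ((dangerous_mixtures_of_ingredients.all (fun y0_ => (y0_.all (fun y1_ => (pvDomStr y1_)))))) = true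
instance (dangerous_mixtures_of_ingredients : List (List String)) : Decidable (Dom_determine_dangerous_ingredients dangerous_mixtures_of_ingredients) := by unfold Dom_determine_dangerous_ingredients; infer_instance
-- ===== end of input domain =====

-- B replaces A's recursive rounds (which re-subtract the resolved set from EVERY mixture each
-- round) with a worklist over an ingredient→mixture-indices inverted index: a resolved
-- ingredient is removed only from the mixtures containing it (objective: alternative).
-- NOTE: Python A MUTATES its argument (set.pop and '-='); B does not; the equivalence proved
-- here is about the RETURN value only.

-- ===== PORT A =====
-- The Python argument is a list of SETS: each inner List String is read as the set of its
-- distinct elements (PySem.Set.ofList) at the call boundary; the returned set is compared as a set.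
-- 'mixture.pop()' on a length-1 set deterministically returns its unique element (headD "");
-- the pop's mutation of the mixture is absorbed by the subsequent 'mixture -= newly' (the popped
-- element is itself a member of 'newly'), so the port leaves the element in place and lets the
-- set difference remove it.

-- the set comprehension { mixture.pop() for mixture in ms if len(mixture) == 1 }
def pvA_collect (ms : List (PySem.Set String)) : PySem.Set String :=
  ms.foldl (fun acc m => if m.length == 1 then PySem.Set.add acc (m.headD "") else acc) []

-- the four lemmas below are cited by pvA_core's termination proof
lemma pv_sum_map_lt (ms : List (List String)) (f g : List String → Nat)
    (hle : ∀ m ∈ ms, f m ≤ g m) (hlt : ∃ m ∈ ms, f m < g m) :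
    (ms.map f).sum < (ms.map g).sum := by
  induction ms with
  | nil => simp at hlt
  | cons a t ih =>
    simp only [List.map_cons, List.sum_cons]
    obtain ⟨m, hm, hmlt⟩ := hlt
    rcases List.mem_cons.mp hm with hm | hm
    · subst hm
      exact Nat.add_lt_add_of_lt_of_le hmlt
        (List.sum_le_sum (fun i hi => hle i (List.mem_cons_of_mem _ hi)))
    · exact Nat.add_lt_add_of_le_of_lt (hle a (List.mem_cons_self))
        (ih (fun i hi => hle i (List.mem_cons_of_mem _ hi)) ⟨m, hm, hmlt⟩)

lemma pv_mem_foldl_acc (ms : List (PySem.Set String)) (acc : PySem.Set String) (x : String)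
    (hx : x ∈ acc) :
    x ∈ ms.foldl (fun acc m => if m.length == 1 then PySem.Set.add acc (m.headD "") else acc) acc := by
  induction ms generalizing acc with
  | nil => simp only [List.foldl_nil]; exact hx
  | cons a t ih =>
    simp only [List.foldl_cons]
    apply ih
    split
    · exact (PySem.Set.mem_add _ _ _).mpr (Or.inl hx)
    · exact hx

lemma pv_mem_collect (ms : List (PySem.Set String)) (m : PySem.Set String)
    (hm : m ∈ ms) (h1 : m.length = 1) : m.headD "" ∈ pvA_collect ms := by
  unfold pvA_collect
  generalize hacc : ([] : PySem.Set String) = acc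
  clear hacc
  induction ms generalizing acc with
  | nil => simp at hm
  | cons a t ih =>
    simp only [List.foldl_cons]
    rcases List.mem_cons.mp hm with hm | hm
    · subst hm
      have : m.headD "" ∈ PySem.Set.add acc (m.headD "") :=
        (PySem.Set.mem_add _ _ _).mpr (Or.inr rfl)
      simp only [h1, beq_self_eq_true, if_pos]
      exact pv_mem_foldl_acc t _ _ this
    · exact ih hm _

lemma pv_foldl_no_singleton (ms : List (PySem.Set String)) (acc : PySem.Set String)
    (hc : ∀ m ∈ ms, m.length ≠ 1) :
    ms.foldl (fun acc m => if m.length == 1 then PySem.Set.add acc (m.headD "") else acc) acc = acc := by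
  induction ms generalizing acc with
  | nil => rfl
  | cons a t ih =>
    simp only [List.foldl_cons]
    have ha : ¬ (a.length == 1) = true := by
      simpa using hc a List.mem_cons_self
    rw [if_neg ha]
    exact ih _ (fun m hm => hc m (List.mem_cons_of_mem _ hm))

lemma pv_collect_ne_nil (ms : List (PySem.Set String)) (h : pvA_collect ms ≠ []) :
    ∃ m ∈ ms, m.length = 1 := by
  by_contra hc
  exact h (pv_foldl_no_singleton ms [] (fun m hm h1 => hc ⟨m, hm, h1⟩))

lemma pvA_decrease (ms : List (PySem.Set String)) (h : pvA_collect ms ≠ []) :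
    (ms.map (fun m => (PySem.Set.diff m (pvA_collect ms)).length)).sum
      < (ms.map List.length).sum := by
  apply pv_sum_map_lt
  · intro m _
    exact List.length_filter_le _ m
  · obtain ⟨m, hm, h1⟩ := pv_collect_ne_nil ms h
    refine ⟨m, hm, ?_⟩
    have hx : m.headD "" ∈ pvA_collect ms := pv_mem_collect ms m hm h1
    obtain ⟨x, rfl⟩ := List.length_eq_one_iff.mp h1
    simp only [List.headD_cons] at hx
    simp [PySem.Set.diff, PySem.Set.contains, List.filter, hx]

def pvA_core (ms : List (PySem.Set String)) : List String :=
  let newly := pvA_collect ms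
  if newly.isEmpty then []
  else PySem.Set.union newly (pvA_core (ms.map (fun m => PySem.Set.diff m newly)))
termination_by (ms.map List.length).sum
decreasing_by
  rename_i h
  have hne : pvA_collect ms ≠ [] := by
    intro hh
    exact h (by rw [show newly = pvA_collect ms from rfl, hh]; rfl)
  simpa [List.map_map, Function.comp] using pvA_decrease ms hne

def determine_dangerous_ingredients (dangerous_mixtures_of_ingredients : List (List String)) : List String :=
  pvA_core (dangerous_mixtures_of_ingredients.map PySem.Set.ofList)

-- ===== PORT B =====
-- Port notes (the port follows Source B step for step):
--  * 'index' is a PySem.Dict String (List Nat); Python's 'postings = index.setdefault(ing, [])'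
--    followed by an in-place 'postings.append(j)' is 'insert ing (getD ing [] ++ [j])' (the
--    setdefault's bare insertion of [] is always followed by the append on that branch).
--  * 'remaining[j].discard(ingredient)' (in-place at index j) is 'List.set j (Set.discard …)';
--    'remaining[j]' with an in-range j is 'List.getD j []'.
--  * '(ingredient,) = remaining[j]' unpacks a 1-element set: its unique element, 'headD ""'.
--  * the while-loop is a fuel recursion; the fuel (total ingredient count + 1) only makes the
--    recursion structural and is proved sufficient below (pv_fuel_enough in pvB_loop_eq).

-- index = {} ; for j in range(len(mixtures)): for ing in mixtures[j]: …append j once…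
def pvB_index (ms : List (List String)) : PySem.Dict String (List Nat) :=
  (List.range ms.length).foldl (fun idx j =>
    (ms.getD j []).foldl (fun idx ing =>
      let postings := idx.getD ing []
      if postings.isEmpty || postings.getLast? != some j
      then idx.insert ing (postings ++ [j]) else idx) idx)
    PySem.Dict.empty

-- [j for j in range(len(remaining)) if len(remaining[j]) == 1]
def pvB_frontier (rem : List (PySem.Set String)) : List Nat :=
  (List.range rem.length).filter (fun j => (rem.getD j []).length == 1)

-- newly = [] ; for j in frontier: (ing,) = remaining[j]; if ing not in newly: newly.append(ing)
def pvB_newly (rem : List (PySem.Set String)) (frontier : List Nat) : List String :=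
  frontier.foldl (fun newly j =>
    let ing := (rem.getD j []).headD ""
    if newly.contains ing then newly else newly ++ [ing]) []

-- for ing in newly: for j in index[ing]: remaining[j].discard(ing)
def pvB_remove (idx : PySem.Dict String (List Nat)) (rem : List (PySem.Set String))
    (newly : List String) : List (PySem.Set String) :=
  newly.foldl (fun rem ing =>
    (idx.getD ing []).foldl (fun rem j =>
      rem.set j (PySem.Set.discard (rem.getD j []) ing)) rem) rem

-- while frontier: …   (fuel-guarded; fuel is proved never to run out on the wrapper's call)
def pvB_loop (idx : PySem.Dict String (List Nat)) (fuel : Nat) (rem : List (PySem.Set String))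
    (resolved : List String) (frontier : List Nat) : List String :=
  match fuel with
  | 0 => resolved
  | fuel + 1 =>
    if frontier.isEmpty then resolved
    else
      let newly := pvB_newly rem frontier
      let rem' := pvB_remove idx rem newly
      pvB_loop idx fuel rem' (resolved ++ newly) (pvB_frontier rem')

def determine_dangerous_ingredients_alt (dangerous_mixtures_of_ingredients : List (List String)) : List String :=
  let rem := dangerous_mixtures_of_ingredients.map PySem.Set.ofList
  let idx := pvB_index dangerous_mixtures_of_ingredients
  PySem.Set.ofList (pvB_loop idx ((dangerous_mixtures_of_ingredients.map List.length).sum + 1)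
    rem [] (pvB_frontier rem))

-- ===== PRECONDITION & SPEC =====
def Spec_determine_dangerous_ingredients (dangerous_mixtures_of_ingredients : List (List String)) (out : List String) : Prop := out = determine_dangerous_ingredients_alt dangerous_mixtures_of_ingredients
instance (dangerous_mixtures_of_ingredients : List (List String)) (out : List String) : Decidable (Spec_determine_dangerous_ingredients dangerous_mixtures_of_ingredients out) := by unfold Spec_determine_dangerous_ingredients; infer_instance

-- ===== CLAIM (what is proved, stated in full; the proofs are below) =====
def Claim_equal_determine_dangerous_ingredients : Prop := ∀ (dangerous_mixtures_of_ingredients : List (List String)), Dom_determine_dangerous_ingredients dangerous_mixtures_of_ingredients → Spec_determine_dangerous_ingredients dangerous_mixtures_of_ingredients (determine_dangerous_ingredients dangerous_mixtures_of_ingredients)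

-- ===== LEMMAS AND PROOFS =====

-- ---- facts about A's collector (shared characterisation) ----

lemma pv_mem_collect_sub (ms : List (PySem.Set String)) (x : String)
    (hx : x ∈ pvA_collect ms) : ∃ m ∈ ms, x ∈ m := by
  unfold pvA_collect at hx
  suffices h : ∀ acc : PySem.Set String,
      x ∈ ms.foldl (fun acc m => if m.length == 1 then PySem.Set.add acc (m.headD "") else acc) acc →
      x ∈ acc ∨ ∃ m ∈ ms, x ∈ m by
    rcases h [] hx with h | h
    · simp at h
    · exact h
  clear hx
  induction ms with
  | nil => intro acc hx; exact Or.inl (by simpa using hx)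
  | cons a t ih =>
    intro acc hx
    simp only [List.foldl_cons] at hx
    rcases ih _ hx with h | ⟨m, hm, hxm⟩
    · by_cases h1 : (a.length == 1) = true
      · rw [if_pos h1] at h
        rcases (PySem.Set.mem_add _ _ _).mp h with h | h
        · exact Or.inl h
        · refine Or.inr ⟨a, List.mem_cons_self, ?_⟩
          obtain ⟨y, rfl⟩ := List.length_eq_one_iff.mp (by simpa using h1)
          simp [h]
      · rw [if_neg h1] at h
        exact Or.inl h
    · exact Or.inr ⟨m, List.mem_cons_of_mem _ hm, hxm⟩

lemma pv_collect_nodup (ms : List (PySem.Set String)) : (pvA_collect ms).Nodup := by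
  unfold pvA_collect
  suffices h : ∀ acc : PySem.Set String, acc.Nodup →
      (ms.foldl (fun acc m => if m.length == 1 then PySem.Set.add acc (m.headD "") else acc) acc).Nodup from
    h [] List.nodup_nil
  induction ms with
  | nil => intro acc hacc; simpa using hacc
  | cons a t ih =>
    intro acc hacc
    simp only [List.foldl_cons]
    apply ih
    split
    · exact PySem.Set.nodup_add _ _ hacc
    · exact hacc

lemma pvA_core_sub (ms : List (PySem.Set String)) (x : String)
    (hx : x ∈ pvA_core ms) : ∃ m ∈ ms, x ∈ m := by
  suffices h : ∀ N ms x, (ms.map List.length).sum < N → x ∈ pvA_core ms → ∃ m ∈ ms, x ∈ m from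
    h _ ms x (Nat.lt_succ_self _) hx
  clear hx ms x
  intro N
  induction N with
  | zero => intro ms x h; omega
  | succ N ih =>
    intro ms x hlt hx
    rw [pvA_core.eq_def] at hx
    simp only at hx
    by_cases he : (pvA_collect ms).isEmpty = true
    · rw [if_pos he] at hx; simp at hx
    · rw [if_neg he] at hx
      rcases (PySem.Set.mem_update _ _ _).mp hx with h | h
      · exact pv_mem_collect_sub ms x h
      · have hne : pvA_collect ms ≠ [] := by simpa [List.isEmpty_iff] using he
        have hd := pvA_decrease ms hne
        have hm : ((ms.map (fun m => PySem.Set.diff m (pvA_collect ms))).map List.length).sum < N := by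
          rw [List.map_map,
            show (List.length ∘ fun m => PySem.Set.diff m (pvA_collect ms))
              = (fun m => (PySem.Set.diff m (pvA_collect ms)).length) from funext (fun m => rfl)]
          omega
        obtain ⟨m', hm', hxm'⟩ := ih _ x hm h
        obtain ⟨m, hm, rfl⟩ := List.mem_map.mp hm'
        exact ⟨m, hm, List.mem_of_mem_filter hxm'⟩

lemma pvA_core_nodup (ms : List (PySem.Set String)) : (pvA_core ms).Nodup := by
  suffices h : ∀ N ms, (ms.map List.length).sum < N → (pvA_core ms).Nodup from
    h _ ms (Nat.lt_succ_self _)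
  clear ms
  intro N
  induction N with
  | zero => intro ms h; omega
  | succ N _ =>
    intro ms _
    rw [pvA_core.eq_def]
    simp only
    by_cases he : (pvA_collect ms).isEmpty = true
    · rw [if_pos he]; exact List.nodup_nil
    · rw [if_neg he]
      exact PySem.Set.nodup_union _ _ (pv_collect_nodup ms)

lemma pv_union_append (s t : PySem.Set String) (ht : t.Nodup)
    (hdis : ∀ x ∈ t, x ∉ s) : PySem.Set.union s t = s ++ t := by
  rw [show PySem.Set.union s t = PySem.Set.update s t from rfl,
      PySem.Set.update_eq_append_filter, PySem.Set.ofList_eq_self_of_nodup t ht]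
  congr 1
  apply List.filter_eq_self.mpr
  intro a ha
  simpa [PySem.Set.contains] using hdis a ha

lemma pv_diff_diff (m r n : List String) :
    PySem.Set.diff (PySem.Set.diff m r) n = PySem.Set.diff m (r ++ n) := by
  simp only [PySem.Set.diff, List.filter_filter]
  apply List.filter_congr
  intro x _
  simp only [PySem.Set.contains, List.contains_append, Bool.not_or]
  exact Bool.and_comm _ _

lemma pv_diff_nil (m : PySem.Set String) : PySem.Set.diff m [] = m := by
  simp [PySem.Set.diff, PySem.Set.contains]

-- ---- the inverted index covers every occurrence ----

lemma pv_index_step_mono (j' : Nat) (m : List String)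
    (idx : PySem.Dict String (List Nat)) (ing : String) (j : Nat)
    (h : j ∈ idx.getD ing []) :
    j ∈ (m.foldl (fun idx ing =>
      let postings := idx.getD ing []
      if postings.isEmpty || postings.getLast? != some j'
      then idx.insert ing (postings ++ [j']) else idx) idx).getD ing [] := by
  induction m generalizing idx with
  | nil => exact h
  | cons a t ih =>
    simp only [List.foldl_cons]
    apply ih
    by_cases hb : ((idx.getD a []).isEmpty || (idx.getD a []).getLast? != some j') = true
    · simp only [hb, if_pos]
      rw [PySem.Dict.getD_insert]
      by_cases hia : ing = a
      · subst hia; simp [List.mem_append, h]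
      · simp [hia, h]
    · simp only [hb]
      simpa using h

lemma pv_index_step_cover (j' : Nat) (m : List String)
    (idx : PySem.Dict String (List Nat)) (ing : String) (h : ing ∈ m) :
    j' ∈ (m.foldl (fun idx ing =>
      let postings := idx.getD ing []
      if postings.isEmpty || postings.getLast? != some j'
      then idx.insert ing (postings ++ [j']) else idx) idx).getD ing [] := by
  induction m generalizing idx with
  | nil => simp at h
  | cons a t ih =>
    simp only [List.foldl_cons]
    rcases List.mem_cons.mp h with rfl | ht
    · by_cases hb : ((idx.getD ing []).isEmpty || (idx.getD ing []).getLast? != some j') = true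
      · simp only [hb, if_pos]
        apply pv_index_step_mono
        rw [PySem.Dict.getD_insert_self]
        simp
      · apply pv_index_step_mono
        rw [Bool.not_eq_true] at hb
        simp only [hb, Bool.false_eq_true, if_false]
        have hlast : (idx.getD ing []).getLast? = some j' := by
          rcases Bool.or_eq_false_iff.mp hb with ⟨h1, h2⟩
          simpa using h2
        exact List.mem_of_getLast? hlast
    · exact ih _ ht

lemma pv_index_fold_mono (ms : List (List String)) (L : List Nat)
    (idx : PySem.Dict String (List Nat)) (ing : String) (j : Nat)
    (h : j ∈ idx.getD ing []) :
    j ∈ (L.foldl (fun idx j' =>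
      (ms.getD j' []).foldl (fun idx ing =>
        let postings := idx.getD ing []
        if postings.isEmpty || postings.getLast? != some j'
        then idx.insert ing (postings ++ [j']) else idx) idx) idx).getD ing [] := by
  induction L generalizing idx with
  | nil => exact h
  | cons a L ih =>
    simp only [List.foldl_cons]
    exact ih _ (pv_index_step_mono a (ms.getD a []) idx ing j h)

lemma pv_index_cover (ms : List (List String)) (ing : String) (j : Nat)
    (h : ing ∈ ms.getD j []) (hj : j < ms.length) :
    j ∈ (pvB_index ms).getD ing [] := by
  suffices hc : ∀ (L : List Nat) (idx : PySem.Dict String (List Nat)), j ∈ L →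
      j ∈ (L.foldl (fun idx j' =>
        (ms.getD j' []).foldl (fun idx ing =>
          let postings := idx.getD ing []
          if postings.isEmpty || postings.getLast? != some j'
          then idx.insert ing (postings ++ [j']) else idx) idx) idx).getD ing [] by
    exact hc (List.range ms.length) _ (List.mem_range.mpr hj)
  intro L
  induction L with
  | nil => intro idx hL; simp at hL
  | cons a L ih =>
    intro idx hL
    simp only [List.foldl_cons]
    rcases List.mem_cons.mp hL with rfl | hL
    · exact pv_index_fold_mono ms L _ ing j (pv_index_step_cover j (ms.getD j []) idx ing h)
    · exact ih _ hL

-- ---- the removal loop is a pointwise set difference ----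

lemma pv_discard_idem (s : PySem.Set String) (ing : String) :
    PySem.Set.discard (PySem.Set.discard s ing) ing = PySem.Set.discard s ing := by
  simp [PySem.Set.discard, List.filter_filter]

lemma pv_discard_of_not_mem (s : PySem.Set String) (ing : String) (h : ing ∉ s) :
    PySem.Set.discard s ing = s := by
  unfold PySem.Set.discard
  apply List.filter_eq_self.mpr
  intro a ha
  have hne : a ≠ ing := fun he => h (he ▸ ha)
  simp [hne]

lemma pv_diff_cons (s : PySem.Set String) (i : String) (r : List String) :
    PySem.Set.diff s (i :: r) = PySem.Set.diff (PySem.Set.discard s i) r := by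
  simp only [PySem.Set.diff, PySem.Set.discard, List.filter_filter]
  apply List.filter_congr
  intro x _
  simp only [PySem.Set.contains, List.contains_cons, Bool.not_or]
  exact (Bool.and_comm _ _).symm

lemma pv_setfold_getD (L : List Nat) (rem : List (PySem.Set String)) (ing : String) (k : Nat) :
    (L.foldl (fun rem j => rem.set j (PySem.Set.discard (rem.getD j []) ing)) rem).getD k []
      = if k ∈ L then PySem.Set.discard (rem.getD k []) ing else rem.getD k [] := by
  induction L generalizing rem with
  | nil => simp
  | cons j L ih =>
    simp only [List.foldl_cons]
    rw [ih]
    by_cases hkj : k = j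
    · subst hkj
      by_cases hk : k < rem.length
      · have hset : (rem.set k (PySem.Set.discard (rem.getD k []) ing)).getD k []
            = PySem.Set.discard (rem.getD k []) ing := by
          simp [List.getD_eq_getElem?_getD, hk]
        rw [hset]
        by_cases hkL : k ∈ L
        · simp [hkL, pv_discard_idem]
        · simp [hkL, List.mem_cons]
      · have hge : rem.length ≤ k := Nat.le_of_not_lt hk
        have hnil : rem.getD k [] = [] := by
          simp [List.getD_eq_getElem?_getD, List.getElem?_eq_none hge]
        have hset : rem.set k (PySem.Set.discard (rem.getD k []) ing) = rem :=
          List.set_eq_of_length_le hge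
        rw [hset, hnil]
        by_cases hkL : k ∈ L
        · simp [hkL]
        · simp [hkL, PySem.Set.discard]
    · have hset : (rem.set j (PySem.Set.discard (rem.getD j []) ing)).getD k []
          = rem.getD k [] := by
        simp [List.getD_eq_getElem?_getD, Ne.symm hkj]
      rw [hset]
      by_cases hkL : k ∈ L
      · simp [hkL, List.mem_cons, hkj]
      · simp [hkL, List.mem_cons, hkj]

lemma pv_setfold_length (L : List Nat) (rem : List (PySem.Set String)) (ing : String) :
    (L.foldl (fun rem j => rem.set j (PySem.Set.discard (rem.getD j []) ing)) rem).length
      = rem.length := by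
  induction L generalizing rem with
  | nil => rfl
  | cons j L ih => simp only [List.foldl_cons]; rw [ih, List.length_set]

-- one resolved ingredient pushed through the index removes it from every mixture
lemma pv_remove_one_getD (ms : List (List String)) (rem : List (PySem.Set String)) (ing : String)
    (hsub : ∀ k, ∀ x ∈ rem.getD k [], x ∈ ms.getD k []) (k : Nat) :
    (((pvB_index ms).getD ing []).foldl
        (fun rem j => rem.set j (PySem.Set.discard (rem.getD j []) ing)) rem).getD k []
      = PySem.Set.discard (rem.getD k []) ing := by
  rw [pv_setfold_getD]
  by_cases hkL : k ∈ (pvB_index ms).getD ing []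
  · rw [if_pos hkL]
  · rw [if_neg hkL]
    refine (pv_discard_of_not_mem _ _ ?_).symm
    intro hmem
    by_cases hk : k < ms.length
    · exact hkL (pv_index_cover ms ing k (hsub k ing hmem) hk)
    · have hknil : ms.getD k [] = [] := by
        simp [List.getD_eq_getElem?_getD, List.getElem?_eq_none (Nat.le_of_not_lt hk)]
      have := hsub k ing hmem
      rw [hknil] at this
      simp at this

lemma pvB_remove_getD (ms : List (List String)) (newly : List String)
    (rem : List (PySem.Set String))
    (hsub : ∀ k, ∀ x ∈ rem.getD k [], x ∈ ms.getD k []) (k : Nat) :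
    (pvB_remove (pvB_index ms) rem newly).getD k []
      = PySem.Set.diff (rem.getD k []) newly := by
  induction newly generalizing rem with
  | nil => exact (pv_diff_nil _).symm
  | cons ing rest ih =>
    simp only [pvB_remove, List.foldl_cons]
    have hsub1 : ∀ k, ∀ x ∈ (((pvB_index ms).getD ing []).foldl
        (fun rem j => rem.set j (PySem.Set.discard (rem.getD j []) ing)) rem).getD k [],
        x ∈ ms.getD k [] := by
      intro k' x hx
      rw [pv_remove_one_getD ms rem ing hsub k'] at hx
      exact hsub k' x (List.mem_of_mem_filter hx)
    have := ih _ hsub1 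
    simp only [pvB_remove] at this
    rw [this, pv_remove_one_getD ms rem ing hsub k, pv_diff_cons]

lemma pvB_remove_length (idx : PySem.Dict String (List Nat)) (newly : List String)
    (rem : List (PySem.Set String)) :
    (pvB_remove idx rem newly).length = rem.length := by
  induction newly generalizing rem with
  | nil => rfl
  | cons ing rest ih =>
    simp only [pvB_remove, List.foldl_cons] at *
    rw [ih, pv_setfold_length]

lemma pvB_remove_eq (ms : List (List String)) (rem : List (PySem.Set String))
    (newly : List String)
    (hsub : ∀ k, ∀ x ∈ rem.getD k [], x ∈ ms.getD k []) :
    pvB_remove (pvB_index ms) rem newly = rem.map (fun m => PySem.Set.diff m newly) := by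
  apply List.ext_getElem
  · rw [pvB_remove_length, List.length_map]
  · intro k hk1 hk2
    have hklen : k < rem.length := by rwa [pvB_remove_length] at hk1
    have h1 : (pvB_remove (pvB_index ms) rem newly)[k] 
        = (pvB_remove (pvB_index ms) rem newly).getD k [] := by
      rw [List.getD_eq_getElem?_getD, List.getElem?_eq_getElem hk1]
      rfl
    rw [h1, pvB_remove_getD ms newly rem hsub k, List.getElem_map,
      List.getD_eq_getElem?_getD, List.getElem?_eq_getElem hklen]
    rfl

-- ---- B's per-round collector equals A's ----

lemma pv_collect_eq_filter (ms : List (PySem.Set String)) :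
    pvA_collect ms
      = (ms.filter (fun m => m.length == 1)).foldl
          (fun acc m => PySem.Set.add acc (m.headD "")) [] := by
  unfold pvA_collect
  generalize ([] : PySem.Set String) = acc
  induction ms generalizing acc with
  | nil => rfl
  | cons a t ih =>
    simp only [List.foldl_cons, List.filter_cons]
    by_cases h1 : (a.length == 1) = true
    · rw [if_pos h1, if_pos h1, List.foldl_cons]
      exact ih _
    · rw [if_neg h1, if_neg h1]
      exact ih _

lemma pv_map_getD_range (rem : List (PySem.Set String)) :
    (List.range rem.length).map (fun j => rem.getD j []) = rem := by
  apply List.ext_getElem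
  · simp
  · intro k hk1 hk2
    simp only [List.getElem_map, List.getElem_range]
    rw [List.getD_eq_getElem?_getD, List.getElem?_eq_getElem hk2]
    rfl

lemma pv_filter_map_comm (l : List Nat) (f : Nat → PySem.Set String)
    (p : PySem.Set String → Bool) :
    (l.filter (fun j => p (f j))).map f = (l.map f).filter p := by
  induction l with
  | nil => rfl
  | cons a t ih =>
    simp only [List.filter_cons, List.map_cons]
    by_cases h : p (f a) = true
    · rw [if_pos h, if_pos h, List.map_cons, ih]
    · rw [if_neg h, if_neg h, ih]

lemma pv_filter_map_getD (rem : List (PySem.Set String)) :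
    ((List.range rem.length).filter (fun j => (rem.getD j []).length == 1)).map
        (fun j => rem.getD j [])
      = rem.filter (fun m => m.length == 1) := by
  rw [pv_filter_map_comm (List.range rem.length) (fun j => rem.getD j [])
    (fun m => m.length == 1), pv_map_getD_range]

lemma pvB_newly_eq (rem : List (PySem.Set String)) :
    pvB_newly rem (pvB_frontier rem) = pvA_collect rem := by
  unfold pvB_newly pvB_frontier
  rw [pv_collect_eq_filter]
  rw [← pv_filter_map_getD, List.foldl_map]
  rfl

lemma pv_frontier_empty_iff (rem : List (PySem.Set String)) :
    pvB_frontier rem = [] ↔ pvA_collect rem = [] := by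
  constructor
  · intro h
    apply pv_foldl_no_singleton
    intro m hm h1
    obtain ⟨j, hj, rfl⟩ := List.mem_iff_getElem.mp hm
    have hjm : j ∈ (List.range rem.length).filter (fun j => (rem.getD j []).length == 1) := by
      apply List.mem_filter.mpr
      refine ⟨List.mem_range.mpr hj, ?_⟩
      rw [List.getD_eq_getElem?_getD, List.getElem?_eq_getElem hj]
      simpa using h1
    rw [show (List.range rem.length).filter (fun j => (rem.getD j []).length == 1)
        = pvB_frontier rem from rfl, h] at hjm
    simp at hjm
  · intro h
    by_contra hne
    obtain ⟨j, hjm⟩ := List.exists_mem_of_ne_nil _ hne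
    have := List.mem_filter.mp hjm
    have hj : j < rem.length := List.mem_range.mp this.1
    have h1 : (rem.getD j []).length = 1 := by simpa using this.2
    have hget : rem.getD j [] ∈ rem := by
      rw [List.getD_eq_getElem?_getD, List.getElem?_eq_getElem hj]
      exact List.getElem_mem hj
    have := pv_mem_collect rem _ hget (by
      rwa [List.getD_eq_getElem?_getD] at h1)
    rw [h] at this
    simp at this

-- ---- the main loop invariant ----

-- what remains of each mixture is always inside the original mixture
lemma pv_hsub (ms : List (List String)) (resolved : List String) :
    ∀ k, ∀ x ∈ ((ms.map PySem.Set.ofList).map (fun m => PySem.Set.diff m resolved)).getD k [],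
      x ∈ ms.getD k [] := by
  intro k x hx
  by_cases hk : k < ms.length
  · rw [List.getD_eq_getElem?_getD, List.getElem?_map, List.getElem?_map,
      List.getElem?_eq_getElem hk] at hx
    simp only [Option.map_some, Option.getD_some] at hx
    have hx2 : x ∈ PySem.Set.ofList ms[k] := List.mem_of_mem_filter hx
    have hx3 : x ∈ ms[k] := (PySem.Set.mem_ofList _ _).mp hx2
    rwa [List.getD_eq_getElem?_getD, List.getElem?_eq_getElem hk]
  · rw [List.getD_eq_getElem?_getD, List.getElem?_eq_none
      (by simpa using Nat.le_of_not_lt hk)] at hx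
    simp at hx

lemma pvB_loop_eq (ms : List (List String)) :
    ∀ (fuel : Nat) (resolved : List String),
      (((ms.map PySem.Set.ofList).map (fun m => PySem.Set.diff m resolved)).map List.length).sum < fuel →
      pvB_loop (pvB_index ms) fuel
          ((ms.map PySem.Set.ofList).map (fun m => PySem.Set.diff m resolved)) resolved
          (pvB_frontier ((ms.map PySem.Set.ofList).map (fun m => PySem.Set.diff m resolved)))
        = resolved ++ pvA_core ((ms.map PySem.Set.ofList).map (fun m => PySem.Set.diff m resolved)) := by
  intro fuel
  induction fuel with
  | zero => intro resolved h; omega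
  | succ fuel ih =>
    intro resolved hlt
    set R := (ms.map PySem.Set.ofList).map (fun m => PySem.Set.diff m resolved) with hR
    by_cases he : (pvB_frontier R).isEmpty = true
    · simp only [pvB_loop, if_pos he]
      have hcoll : pvA_collect R = [] := (pv_frontier_empty_iff R).mp (List.isEmpty_iff.mp he)
      rw [pvA_core.eq_def]
      simp only [hcoll]
      simp
    · simp only [pvB_loop, if_neg he]
      have hfne : pvB_frontier R ≠ [] := by simpa [List.isEmpty_iff] using he
      have hne : pvA_collect R ≠ [] := fun hc => hfne ((pv_frontier_empty_iff R).mpr hc)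
      have hnewly : pvB_newly R (pvB_frontier R) = pvA_collect R := pvB_newly_eq R
      have hrem : pvB_remove (pvB_index ms) R (pvB_newly R (pvB_frontier R))
          = R.map (fun m => PySem.Set.diff m (pvB_newly R (pvB_frontier R))) :=
        pvB_remove_eq ms R _ (pv_hsub ms resolved)
      have hrem2 : R.map (fun m => PySem.Set.diff m (pvA_collect R))
          = (ms.map PySem.Set.ofList).map
              (fun m => PySem.Set.diff m (resolved ++ pvA_collect R)) := by
        rw [hR, List.map_map]
        exact List.map_congr_left (fun m _ => pv_diff_diff m resolved _)
      have hmeas : (((ms.map PySem.Set.ofList).map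
            (fun m => PySem.Set.diff m (resolved ++ pvA_collect R))).map List.length).sum < fuel := by
        have hd := pvA_decrease R hne
        have heq : ((R.map (fun m => PySem.Set.diff m (pvA_collect R))).map List.length).sum
            = (R.map (fun m => (PySem.Set.diff m (pvA_collect R)).length)).sum := by
          rw [List.map_map]
          rfl
        rw [← hrem2, heq]
        omega
      have hih := ih (resolved ++ pvA_collect R) hmeas
      have hcore : pvA_core R
          = pvA_collect R ++ pvA_core ((ms.map PySem.Set.ofList).map
              (fun m => PySem.Set.diff m (resolved ++ pvA_collect R))) := by
        conv_lhs => rw [pvA_core.eq_def]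
        simp only
        rw [if_neg (by simpa [List.isEmpty_iff] using hne), hrem2]
        apply pv_union_append _ _ (pvA_core_nodup _)
        intro x hx hxn
        obtain ⟨m', hm', hxm'⟩ := pvA_core_sub _ x hx
        obtain ⟨m, _, rfl⟩ := List.mem_map.mp hm'
        have hnot := List.of_mem_filter hxm'
        simp only [PySem.Set.contains, Bool.not_eq_eq_eq_not, Bool.not_true,
          List.contains_eq_mem, decide_eq_false_iff_not, List.mem_append] at hnot
        exact hnot (Or.inr hxn)
      rw [hnewly] at hrem
      rw [hnewly, hrem, hrem2, hih, hcore, List.append_assoc]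

-- ===== VERDICT (by name: the statement is the Claim_ definition above) =====
theorem determine_dangerous_ingredients_spec : Claim_equal_determine_dangerous_ingredients := by
  intro xs _
  unfold Spec_determine_dangerous_ingredients
  unfold determine_dangerous_ingredients determine_dangerous_ingredients_alt
  simp only []
  have hid : (xs.map PySem.Set.ofList).map (fun m => PySem.Set.diff m ([] : List String))
      = xs.map PySem.Set.ofList := by
    rw [List.map_congr_left (fun m _ => pv_diff_nil m)]
    simp
  have hfuel : (((xs.map PySem.Set.ofList).map
        (fun m => PySem.Set.diff m ([] : List String))).map List.length).sum
      < (xs.map List.length).sum + 1 := by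
    rw [hid]
    have hle : ((xs.map PySem.Set.ofList).map List.length).sum ≤ (xs.map List.length).sum := by
      rw [List.map_map]
      apply List.sum_le_sum
      intro m hm
      exact PySem.Set.length_ofList_le m
    omega
  have h := pvB_loop_eq xs ((xs.map List.length).sum + 1) [] hfuel
  rw [hid] at h
  rw [h]
  simp only [List.nil_append]
  exact (PySem.Set.ofList_eq_self_of_nodup _ (pvA_core_nodup _)).symm
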